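-- pv_equiv track=rewrite | github.com/hyeonseo1018/151B_SP26_Competition | .ipynb_checkpoints/judger-checkpoint.py | judge_MC_multiple
-- ===== SOURCE A (Python) =====
-- def judge_MC_multiple(pred, gold, options=[]):
--     # TODO: add MC with options that are not ABCD
--     if options == []:
--         common_answer = [chr(i) for i in range(65, 91)] # 'A'~'Z'
--     else:
--         common_answer = [item.lower() for item in options]
--         pred = pred.lower()
--         gold = gold.lower()
--
--     gold_list = [item for item in gold]
--     pred_list = [item for item in pred if item in common_answer]
--     if len(gold_list) != len(pred_list):
--         return False
--
--     # ignore order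
--     idx = -1
--     while len(gold_list) != 0:
--         idx = (idx + 1) % len(gold_list)
--
--         item1 = gold_list[idx]
--
--         for item2 in pred_list:
--             if item1.lower() == item2.lower():
--                 gold_list.remove(item1)
--                 pred_list.remove(item2)
--                 break
--         else:
--             # If we didn't break from the inner loop, it means no match was found
--             return False
--
--     # If all elements are matched and removed, the lists can be paired
--     return True
-- ===== SOURCE B (Python) =====
-- def judge_MC_multiple(pred, gold, options=[]):
--     if options == []:
--         common = set(chr(i) for i in range(65, 91))
--     else:
--         common = set(item.lower() for item in options)
--         pred = pred.lower()
--         gold = gold.lower()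
--     gold_list = [c for c in gold]
--     pred_list = [c for c in pred if c in common]
--     return sorted(c.lower() for c in gold_list) == sorted(c.lower() for c in pred_list)
-- ===== Notes on version B (the rewrite author's own statement) =====
-- stated objective: faster
-- what changed: A's greedy removal-and-rescan while-loop (pick a gold char, scan pred_list for a case-insensitive match, remove from both lists, with a redundant explicit length check) is replaced by sorting the lowercased character lists once and comparing them for equality.
import Mathlib
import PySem

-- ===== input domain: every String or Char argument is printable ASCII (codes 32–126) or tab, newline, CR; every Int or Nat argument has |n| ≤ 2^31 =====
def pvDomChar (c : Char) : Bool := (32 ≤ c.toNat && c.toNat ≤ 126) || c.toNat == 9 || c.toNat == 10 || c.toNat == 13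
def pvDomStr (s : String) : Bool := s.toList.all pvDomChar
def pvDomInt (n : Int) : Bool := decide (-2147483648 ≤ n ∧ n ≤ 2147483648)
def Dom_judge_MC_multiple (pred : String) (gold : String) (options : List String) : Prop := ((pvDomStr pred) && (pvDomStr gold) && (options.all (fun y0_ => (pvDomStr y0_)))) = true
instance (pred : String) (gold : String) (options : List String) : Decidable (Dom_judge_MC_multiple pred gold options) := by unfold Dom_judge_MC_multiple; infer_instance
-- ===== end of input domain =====

-- B replaces A's quadratic greedy removal-and-rescan matching loop by sorting the lowercased
-- character lists once and comparing them (objective: faster, measured). Return values agree on all inputs.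

-- ===== PORT A =====
-- Python strings are handled on the List Char side (PySem.Chars), as PYSEM.md prescribes;
-- the 1-char strings Python iterates over become Chars, options become List Char.

-- common_answer: [chr(i) for i in range(65, 91)]  /  [item.lower() for item in options]
def judgeCommon (options : List String) : List (List Char) :=
  if options = [] then (PySem.List.pyRange 65 91 1).map (fun i => [Char.ofNat i.toNat])
  else options.map (fun o => PySem.Chars.lower o.toList)

-- the inner 'for item2 in pred_list: if item1.lower() == item2.lower(): … break / else: …'
def judgeFind (item1 : Char) (pred_list : List Char) : Option Char :=
  pred_list.find? (fun item2 => PySem.Chars.lowerChar item1 == PySem.Chars.lowerChar item2)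

-- the 'while len(gold_list) != 0' loop; fuel = initial length (each pass removes one element,
-- so the fuel guard is never the reason the loop stops on reachable states)
def judgeLoop (fuel : Nat) (idx : Int) (gold_list pred_list : List Char) : Bool :=
  match fuel with
  | 0 => gold_list.isEmpty
  | fuel + 1 =>
    if gold_list.length = 0 then true else
    let idx' := PySem.Int.mod (idx + 1) (gold_list.length : Int)
    match PySem.List.pyGet? gold_list idx' with
    | none => false  -- unreachable: 0 ≤ idx' < len
    | some item1 =>
      match judgeFind item1 pred_list with
      | none => false
      | some item2 =>
        judgeLoop fuel idx' ((PySem.List.remove? gold_list item1).getD [])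
          ((PySem.List.remove? pred_list item2).getD [])  -- .remove never raises here: both items are members

def judge_MC_multiple (pred : String) (gold : String) (options : List String) : Bool :=
  let common_answer := judgeCommon options
  let predL := if options = [] then pred.toList else PySem.Chars.lower pred.toList
  let goldL := if options = [] then gold.toList else PySem.Chars.lower gold.toList
  let gold_list := goldL
  let pred_list := predL.filter (fun c => common_answer.contains [c])
  if gold_list.length ≠ pred_list.length then false
  else judgeLoop gold_list.length (-1) gold_list pred_list

-- ===== PORT B =====
-- common = set(chr(i) for i in range(65, 91))  /  set(item.lower() for item in options)
def judgeCommonSet (options : List String) : PySem.Set (List Char) :=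
  if options = [] then PySem.Set.ofList ((PySem.List.pyRange 65 91 1).map (fun i => [Char.ofNat i.toNat]))
  else PySem.Set.ofList (options.map (fun o => PySem.Chars.lower o.toList))

def judge_MC_multiple_alt (pred : String) (gold : String) (options : List String) : Bool :=
  let common := judgeCommonSet options
  let predL := if options = [] then pred.toList else PySem.Chars.lower pred.toList
  let goldL := if options = [] then gold.toList else PySem.Chars.lower gold.toList
  let gold_list := goldL
  let pred_list := predL.filter (fun c => PySem.Set.contains common [c])
  PySem.List.sorted (gold_list.map PySem.Chars.lowerChar) (fun x => x) false
    == PySem.List.sorted (pred_list.map PySem.Chars.lowerChar) (fun x => x) false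

-- ===== PRECONDITION & SPEC =====
def Spec_judge_MC_multiple (pred : String) (gold : String) (options : List String) (out : Bool) : Prop := out = judge_MC_multiple_alt pred gold options
instance (pred : String) (gold : String) (options : List String) (out : Bool) : Decidable (Spec_judge_MC_multiple pred gold options out) := by unfold Spec_judge_MC_multiple; infer_instance

-- ===== CLAIM (what is proved, stated in full; the proofs are below) =====
def Claim_equal_judge_MC_multiple : Prop := ∀ (pred : String) (gold : String) (options : List String), Dom_judge_MC_multiple pred gold options → Spec_judge_MC_multiple pred gold options (judge_MC_multiple pred gold options)

-- ===== LEMMAS AND PROOFS =====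

-- both versions filter pred by the same membership test
lemma contains_judgeCommonSet (options : List String) (x : List Char) :
    PySem.Set.contains (judgeCommonSet options) x = (judgeCommon options).contains x := by
  unfold judgeCommonSet judgeCommon
  split <;>
    simp only [PySem.Set.contains_eq_listContains, List.contains_eq_mem, PySem.Set.mem_ofList]

-- A's greedy removal loop decides multiset equality of the lowercased lists
lemma judgeLoop_iff (fuel : Nat) (idx : Int) (g p : List Char)
    (hlen : g.length = p.length) (hf : g.length ≤ fuel) :
    judgeLoop fuel idx g p = true ↔
      (g.map PySem.Chars.lowerChar).Perm (p.map PySem.Chars.lowerChar) := by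
  induction fuel generalizing idx g p with
  | zero =>
    have hg : g = [] := List.eq_nil_of_length_eq_zero (Nat.le_zero.mp hf)
    have hp : p = [] := List.eq_nil_of_length_eq_zero (by omega)
    subst hg; subst hp; simp [judgeLoop]
  | succ fuel ih =>
    by_cases hg0 : g.length = 0
    · have hg : g = [] := List.eq_nil_of_length_eq_zero hg0
      have hp : p = [] := List.eq_nil_of_length_eq_zero (by omega)
      subst hg; subst hp; simp [judgeLoop]
    · have hpos : (0 : Int) < (g.length : Int) := by exact_mod_cast Nat.pos_of_ne_zero hg0
      set idx' := PySem.Int.mod (idx + 1) (g.length : Int) with hidx'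
      have h0 : 0 ≤ idx' := PySem.Int.mod_nonneg _ hpos
      have h1 : idx' < (g.length : Int) := PySem.Int.mod_lt _ hpos
      have hget : PySem.List.pyGet? g idx' = some g[idx'.toNat] :=
        PySem.List.pyGet?_eq_some_getElem g h0 h1
      have hmem1 : g[idx'.toNat] ∈ g := List.getElem_mem _
      rw [judgeLoop]
      simp only [hg0, ← hidx', hget, if_false]
      set item1 := g[idx'.toNat] with hitem1
      cases hfind : judgeFind item1 p with
      | none =>
        simp only [Bool.false_eq_true, false_iff]
        intro hperm
        have hin : PySem.Chars.lowerChar item1 ∈ p.map PySem.Chars.lowerChar :=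
          hperm.mem_iff.mp (List.mem_map_of_mem hmem1)
        obtain ⟨x, hx, hlx⟩ := List.mem_map.mp hin
        have := List.find?_eq_none.mp hfind x hx
        simp [PySem.Chars.lowerChar] at this hlx
        exact this hlx.symm
      | some item2 =>
        have hmem2 : item2 ∈ p := List.mem_of_find?_eq_some hfind
        have heq : PySem.Chars.lowerChar item1 = PySem.Chars.lowerChar item2 := by
          have := List.find?_some hfind
          simpa using this
        show judgeLoop fuel idx' ((PySem.List.remove? g item1).getD [])
            ((PySem.List.remove? p item2).getD []) = true ↔ _
        rw [PySem.List.remove?_eq_some_erase g item1 hmem1, PySem.List.remove?_eq_some_erase p item2 hmem2]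
        simp only [Option.getD_some]
        have hlg : (g.erase item1).length = g.length - 1 := List.length_erase_of_mem hmem1
        have hlp : (p.erase item2).length = p.length - 1 := List.length_erase_of_mem hmem2
        rw [ih idx' (g.erase item1) (p.erase item2) (by omega) (by omega)]
        have hgp : (g.map PySem.Chars.lowerChar).Perm
            (PySem.Chars.lowerChar item1 :: (g.erase item1).map PySem.Chars.lowerChar) :=
          (List.perm_cons_erase hmem1).map _
        have hpp : (p.map PySem.Chars.lowerChar).Perm
            (PySem.Chars.lowerChar item1 :: (p.erase item2).map PySem.Chars.lowerChar) := by
          rw [heq]; exact (List.perm_cons_erase hmem2).map _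
        exact ⟨fun h => hgp.trans (((List.perm_cons _).mpr h).trans hpp.symm),
          fun h => (List.perm_cons _).mp (hgp.symm.trans (h.trans hpp))⟩

-- length check + greedy loop  =  sorted-compare, for any two character lists
lemma judge_lists_eq (g p : List Char) :
    (if g.length ≠ p.length then false else judgeLoop g.length (-1) g p)
      = (PySem.List.sorted (g.map PySem.Chars.lowerChar) (fun x => x) false
          == PySem.List.sorted (p.map PySem.Chars.lowerChar) (fun x => x) false) := by
  by_cases hlen : g.length = p.length
  · rw [if_neg (by omega), Bool.eq_iff_iff,
      judgeLoop_iff g.length (-1) g p hlen (le_refl _), beq_iff_eq,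
      PySem.List.sorted_id_eq_sorted_id_iff_perm]
  · rw [if_pos hlen]
    symm
    rw [beq_eq_false_iff_ne]
    intro hs
    have hperm := (PySem.List.sorted_id_eq_sorted_id_iff_perm _ _).mp hs
    exact hlen (by simpa using hperm.length_eq)

-- ===== VERDICT (by name: the statement is the Claim_ definition above) =====
theorem judge_MC_multiple_spec : Claim_equal_judge_MC_multiple := by
  intro pred gold options _
  show judge_MC_multiple pred gold options = judge_MC_multiple_alt pred gold options
  unfold judge_MC_multiple judge_MC_multiple_alt
  simp only [contains_judgeCommonSet]
  exact judge_lists_eq _ _
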